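-- pv_equiv track=rewrite | github.com/Code12naman/ACC45DAYSOFCODE-2024 | day1_Easy_Pronunciation.py | is_easy_to_pronounce
-- ===== SOURCE A (Python) =====
-- def is_easy_to_pronounce(S):
--     vowels = set('aeiou')
--     consecutive_consonants = 0
--
--     for char in S:
--         if char not in vowels:
--             consecutive_consonants += 1
--             if consecutive_consonants >= 4:
--                 return "NO"
--         else:
--             consecutive_consonants = 0
--
--     return "YES"
-- ===== SOURCE B (Python) =====
-- def is_easy_to_pronounce(S):
--     vowels = "aeiou"
--     quads = zip(S, S[1:], S[2:], S[3:])
--     if any(a not in vowels and b not in vowels and c not in vowels and d not in vowels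
--            for (a, b, c, d) in quads):
--         return "NO"
--     return "YES"
-- ===== Notes on version B (the rewrite author's own statement) =====
-- stated objective: alternative
-- what changed: Replaces the running consonant counter with early return by a sliding-window scan: zip the string with its three shifted slices and report NO iff any window of 4 characters is all non-vowels.
import Mathlib
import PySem

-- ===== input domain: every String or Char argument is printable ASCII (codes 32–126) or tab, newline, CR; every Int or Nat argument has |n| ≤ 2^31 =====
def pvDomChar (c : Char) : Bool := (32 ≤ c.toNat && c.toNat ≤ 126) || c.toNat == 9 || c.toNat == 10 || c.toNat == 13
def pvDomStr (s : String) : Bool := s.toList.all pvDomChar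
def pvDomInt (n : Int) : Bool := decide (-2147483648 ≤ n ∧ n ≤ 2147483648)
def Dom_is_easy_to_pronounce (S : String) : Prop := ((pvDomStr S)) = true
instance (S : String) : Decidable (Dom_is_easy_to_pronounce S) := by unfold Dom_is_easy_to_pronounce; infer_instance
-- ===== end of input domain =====

-- B replaces A's running consonant counter (with early return) by a sliding-window
-- scan: zip the string with its three shifted slices and answer "NO" iff some window
-- of four characters is all non-vowels (objective: alternative; same cost).


-- ===== PORT A =====
-- the loop over S with the running counter; early 'return "NO"' becomes returning "NO"
def pvALoop (l : List Char) (cnt : Int) : String :=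
  match l with
  | [] => "YES"
  | c :: t =>
    if ¬ (PySem.Set.contains (PySem.Set.ofList "aeiou".toList) c = true) then
      if cnt + 1 ≥ 4 then "NO" else pvALoop t (cnt + 1)
    else pvALoop t 0

def is_easy_to_pronounce (S : String) : String :=
  pvALoop S.toList 0

-- ===== PORT B =====
-- zip(S, S[1:], S[2:], S[3:]) as nested pairs; 'x not in "aeiou"' is char non-membership
def is_easy_to_pronounce_alt (S : String) : String :=
  let l := S.toList
  let quads := ((l.zip (PySem.List.slice l (some 1) none)).zip
      (PySem.List.slice l (some 2) none)).zip (PySem.List.slice l (some 3) none)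
  if quads.any (fun q =>
      !("aeiou".toList.contains q.1.1.1) && !("aeiou".toList.contains q.1.1.2) &&
      !("aeiou".toList.contains q.1.2) && !("aeiou".toList.contains q.2)) then "NO"
  else "YES"

-- ===== PRECONDITION & SPEC =====
def Spec_is_easy_to_pronounce (S : String) (out : String) : Prop := out = is_easy_to_pronounce_alt S
instance (S : String) (out : String) : Decidable (Spec_is_easy_to_pronounce S out) := by unfold Spec_is_easy_to_pronounce; infer_instance

-- ===== CLAIM (what is proved, stated in full; the proofs are below) =====
def Claim_equal_is_easy_to_pronounce : Prop := ∀ (S : String), Dom_is_easy_to_pronounce S → Spec_is_easy_to_pronounce S (is_easy_to_pronounce S)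

-- ===== LEMMAS AND PROOFS =====

-- a character A counts as a consonant
def pvCons (c : Char) : Bool := !("aeiou".toList.contains c)

-- number of leading consonants
def pvLead : List Char → Nat
  | [] => 0
  | c :: t => if pvCons c then pvLead t + 1 else 0

-- "some window of four consecutive characters is all consonants"
def pvRun4 : List Char → Bool
  | c1 :: c2 :: c3 :: c4 :: r =>
      (pvCons c1 && pvCons c2 && pvCons c3 && pvCons c4) || pvRun4 (c2 :: c3 :: c4 :: r)
  | _ => false

lemma pvRun4_cons (c : Char) (t : List Char) :
    pvRun4 (c :: t) = (decide (4 ≤ pvLead (c :: t)) || pvRun4 t) := by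
  match t with
  | [] => cases hc : pvCons c <;> simp [pvRun4, pvLead, hc]
  | [c2] => cases h1 : pvCons c <;> cases h2 : pvCons c2 <;> simp [pvRun4, pvLead, h1, h2]
  | [c2, c3] =>
    cases h1 : pvCons c <;> cases h2 : pvCons c2 <;> cases h3 : pvCons c3 <;>
      simp [pvRun4, pvLead, h1, h2, h3]
  | c2 :: c3 :: c4 :: r =>
    have hdef : pvRun4 (c :: c2 :: c3 :: c4 :: r)
        = ((pvCons c && pvCons c2 && pvCons c3 && pvCons c4) || pvRun4 (c2 :: c3 :: c4 :: r)) := rfl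
    rw [hdef]
    congr 1
    cases h1 : pvCons c <;> cases h2 : pvCons c2 <;> cases h3 : pvCons c3 <;>
      cases h4 : pvCons c4 <;> simp [pvLead, h1, h2, h3, h4]

lemma pvRun4_of_lead {l : List Char} (h : 4 ≤ pvLead l) : pvRun4 l = true := by
  cases l with
  | nil => simp [pvLead] at h
  | cons c t => rw [pvRun4_cons]; simp [h]

-- A's membership test against set('aeiou') is char-list membership
lemma pvSet_mem (c : Char) :
    PySem.Set.contains (PySem.Set.ofList "aeiou".toList) c = "aeiou".toList.contains c := by
  have hof : PySem.Set.ofList "aeiou".toList = "aeiou".toList := by decide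
  rw [hof]; simp [PySem.Set.contains]

-- characterisation of A's loop for counter values 0..3
lemma pvALoop_eq (l : List Char) : ∀ cnt : Int, 0 ≤ cnt → cnt ≤ 3 →
    pvALoop l cnt = (if ((pvLead l : Int) ≥ 4 - cnt ∨ pvRun4 l = true) then "NO" else "YES") := by
  induction l with
  | nil =>
    intro cnt h0 h3
    have hcond : ¬ (((pvLead ([] : List Char) : Int)) ≥ 4 - cnt ∨ pvRun4 [] = true) := by
      rintro (h | h)
      · simp [pvLead] at h; omega
      · exact absurd h (by decide)
    rw [if_neg hcond]; rfl
  | cons c t ih =>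
    intro cnt h0 h3
    by_cases hc : pvCons c = true
    · have hnc : ¬ ("aeiou".toList.contains c = true) := by simpa [pvCons] using hc
      have hlead : pvLead (c :: t) = pvLead t + 1 := by simp [pvLead, hc]
      have hrc : (pvRun4 (c :: t) = true) ↔ (4 ≤ pvLead t + 1 ∨ pvRun4 t = true) := by
        rw [pvRun4_cons]; simp [hlead]
      rw [pvALoop, if_pos (by rw [pvSet_mem]; exact hnc)]
      by_cases h4 : cnt + 1 ≥ 4
      · rw [if_pos h4, if_pos]
        left; rw [hlead]; push_cast; omega
      · rw [if_neg h4, ih (cnt + 1) (by omega) (by omega)]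
        have hiff : (((pvLead t : Int)) ≥ 4 - (cnt + 1) ∨ pvRun4 t = true)
            ↔ (((pvLead (c :: t) : Int)) ≥ 4 - cnt ∨ pvRun4 (c :: t) = true) := by
          rw [hrc, hlead]
          constructor
          · rintro (h | h)
            · left; push_cast; omega
            · right; right; exact h
          · rintro (h | h | h)
            · left; push_cast at h ⊢; omega
            · left; omega
            · right; exact h
        rw [if_congr hiff rfl rfl]
    · have hyc : ("aeiou".toList.contains c = true) := by
        by_contra hn; exact hc (by simpa [pvCons] using hn)
      have hlead : pvLead (c :: t) = 0 := by simp [pvLead, hc]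
      have hrc : (pvRun4 (c :: t) = true) ↔ (pvRun4 t = true) := by
        rw [pvRun4_cons]; simp [hlead]
      rw [pvALoop, if_neg (by rw [pvSet_mem]; exact not_not_intro hyc)]
      rw [ih 0 (by omega) (by omega)]
      have hiff : (((pvLead t : Int)) ≥ 4 - 0 ∨ pvRun4 t = true)
          ↔ (((pvLead (c :: t) : Int)) ≥ 4 - cnt ∨ pvRun4 (c :: t) = true) := by
        rw [hrc, hlead]
        constructor
        · rintro (h | h)
          · right; exact pvRun4_of_lead (by omega)
          · right; exact h
        · rintro (h | h)
          · push_cast at h; omega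
          · right; exact h
      rw [if_congr hiff rfl rfl]

-- B's zip-of-shifts scan computes pvRun4
lemma pvZip_eq_run4 (l : List Char) :
    (((l.zip (l.drop 1)).zip (l.drop 2)).zip (l.drop 3)).any (fun q =>
      pvCons q.1.1.1 && pvCons q.1.1.2 && pvCons q.1.2 && pvCons q.2) = pvRun4 l := by
  induction l with
  | nil => simp [pvRun4]
  | cons c t ih =>
    match t with
    | [] => simp [pvRun4]
    | [c2] => simp [pvRun4]
    | [c2, c3] => simp [pvRun4]
    | c2 :: c3 :: c4 :: r =>
      have := ih
      simp only [List.drop, List.zip_cons_cons, List.any_cons] at *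
      rw [this]
      show (pvCons c && pvCons c2 && pvCons c3 && pvCons c4 || pvRun4 (c2 :: c3 :: c4 :: r))
          = pvRun4 (c :: c2 :: c3 :: c4 :: r)
      rfl

-- ===== VERDICT (by name: the statement is the Claim_ definition above) =====
theorem is_easy_to_pronounce_spec : Claim_equal_is_easy_to_pronounce := by
  intro S _
  unfold Spec_is_easy_to_pronounce is_easy_to_pronounce is_easy_to_pronounce_alt
  rw [pvALoop_eq S.toList 0 (by omega) (by omega)]
  have h1 : PySem.List.slice S.toList (some 1) none = S.toList.drop 1 := by
    simpa using PySem.List.slice_from_natCast S.toList 1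
  have h2 : PySem.List.slice S.toList (some 2) none = S.toList.drop 2 := by
    simpa using PySem.List.slice_from_natCast S.toList 2
  have h3 : PySem.List.slice S.toList (some 3) none = S.toList.drop 3 := by
    simpa using PySem.List.slice_from_natCast S.toList 3
  simp only [h1, h2, h3]
  rw [show (fun q : ((Char × Char) × Char) × Char =>
      !("aeiou".toList.contains q.1.1.1) && !("aeiou".toList.contains q.1.1.2) &&
      !("aeiou".toList.contains q.1.2) && !("aeiou".toList.contains q.2)) = (fun q =>
      pvCons q.1.1.1 && pvCons q.1.1.2 && pvCons q.1.2 && pvCons q.2) from by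
    funext q; simp [pvCons, Bool.and_assoc]]
  rw [pvZip_eq_run4]
  by_cases h : pvRun4 S.toList = true
  · simp [h]
  · have h0 : ¬ ((pvLead S.toList : Int) ≥ 4 - 0) := by
      intro hge
      have h4 : 4 ≤ pvLead S.toList := by omega
      exact h (pvRun4_of_lead h4)
    rw [if_neg (by rintro (hh | hh) <;> [exact h0 hh; exact h hh])]
    simp [h]
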